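-- pv_equiv track=rewrite | github.com/42Bangkok-DPs/discovery-piscine-coding-for-all-18-22-nov-azxcv91187 | Rush00/ex00/checkmate.py | Attack_Sword
-- ===== SOURCE A (Python) =====
-- def Attack_Sword(piece, position, king_pos, board):
--
--     #ตรวจสอบการโจมตีของตัวหมากสามารถที่จะโจมตี King ได้หรือไม่
-- #1. กำหนดทิศทางการเคลื่อนที่ของตัวหมาก
--     directions = {
--         'P': [(-1, -1), (-1, 1)],
--         'B': [(-1, -1), (-1, 1), (1, -1), (1, 1)],
--         'R': [(0, -1), (0, 1), (-1, 0), (1, 0)],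
--         'Q': [(-1, -1), (-1, 1), (1, -1), (1, 1), (0, -1), (0, 1), (-1, 0), (1, 0)]
--     }
-- #2. ตรวจสอบว่าหมากที่ให้สามารถโจมตีได้หรือไม่
--     if piece not in directions:
--         return False
-- #3. เดินหมากตามทิศทางที่กำหนด
--     for dr, dc in directions[piece]:
--         r, c = position
--         if piece == 'P': #4. กรณี Pawn (P) Pawn เดินไปแค่ 1 ช่องในแนวเฉียง (เฉพาะแนวโจมตี) ถ้า Pawn เดินไปตำแหน่งของ King ได้ คืนค่า True
--             r += dr
--             c += dc
--             if (r, c) == king_pos: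
--                 return True
--             continue
-- #5. กรณีหมากอื่น (Bishop, Rook, Queen) ใช้ while loop เพื่อเดินในทิศทาง
--         while 0 <= r < len(board) and 0 <= c < len(board[r]):
--             r += dr
--             c += dc
--             if (r, c) == king_pos:
--                 return True
--             if 0 <= r < len(board) and 0 <= c < len(board[r]) and board[r][c] != '.':
--                 break
-- #คืนค่า False หากไม่มีการโจมตี
--     return False
-- ===== SOURCE B (Python) =====
-- def Attack_Sword(piece, position, king_pos, board):
--     # Direct delta analysis: decide the single candidate direction from the
--     # sign of (king - position) and scan that one ray, instead of trying
--     # every direction of the piece.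
--     dr = king_pos[0] - position[0]
--     dc = king_pos[1] - position[1]
--     if piece == 'P':
--         return dr == -1 and (dc == -1 or dc == 1)
--     if piece not in ('B', 'R', 'Q'):
--         return False
--     straight = (dr == 0) != (dc == 0)
--     diagonal = dr != 0 and abs(dr) == abs(dc)
--     if (piece == 'R' and not straight) or (piece == 'B' and not diagonal) \
--             or (piece == 'Q' and not (straight or diagonal)):
--         return False
--     k = max(abs(dr), abs(dc))
--     sr = 1 if dr > 0 else (-1 if dr < 0 else 0)
--     sc = 1 if dc > 0 else (-1 if dc < 0 else 0)
--     r, c = position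
--     if not (0 <= r < len(board) and 0 <= c < len(board[r])):
--         return False
--     r += sr
--     c += sc
--     for _ in range(k - 1):
--         if not (0 <= r < len(board) and 0 <= c < len(board[r])) or board[r][c] != '.':
--             return False
--         r += sr
--         c += sc
--     return True
-- ===== Notes on version B (the rewrite author's own statement) =====
-- stated objective: simpler
-- what changed: Instead of trying every direction in the piece's direction list with a bounded while-loop per direction, B computes the delta king_pos - position once, decides from its sign pattern and shape (straight/diagonal) whether it lies on a ray the piece can move along, and scans only that single candidate ray for blockers.
import Mathlib
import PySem

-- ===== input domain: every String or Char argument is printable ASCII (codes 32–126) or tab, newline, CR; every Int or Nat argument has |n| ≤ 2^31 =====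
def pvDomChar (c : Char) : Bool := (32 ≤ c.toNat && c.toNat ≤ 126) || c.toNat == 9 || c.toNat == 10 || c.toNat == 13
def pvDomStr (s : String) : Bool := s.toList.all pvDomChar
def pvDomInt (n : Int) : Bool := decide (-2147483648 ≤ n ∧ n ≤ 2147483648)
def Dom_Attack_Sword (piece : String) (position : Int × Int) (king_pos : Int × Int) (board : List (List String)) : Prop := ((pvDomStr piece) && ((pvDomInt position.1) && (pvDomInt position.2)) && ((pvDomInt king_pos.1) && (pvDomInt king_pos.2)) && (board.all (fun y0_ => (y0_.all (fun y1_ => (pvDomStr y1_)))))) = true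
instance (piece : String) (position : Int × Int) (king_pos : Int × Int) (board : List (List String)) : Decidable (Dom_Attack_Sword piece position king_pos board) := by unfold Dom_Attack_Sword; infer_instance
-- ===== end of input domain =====

-- B replaces A's try-every-direction loops by a direct delta analysis: the sign
-- pattern of (king_pos - position) picks the single candidate ray, which is then
-- scanned once (objective: simpler).

-- ===== PORT A =====
-- board[r] (only ever evaluated under the guard 0 <= r < len(board))
def pvRow (board : List (List String)) (r : Int) : List String :=
  (PySem.List.pyGet? board r).getD []

-- the chained Python test `0 <= r < len(board) and 0 <= c < len(board[r])`
def pvInB (board : List (List String)) (r c : Int) : Bool :=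
  decide (0 ≤ r) && decide (r < board.length) && decide (0 ≤ c) && decide (c < (pvRow board r).length)

-- board[r][c] (only ever evaluated under pvInB)
def pvCell (board : List (List String)) (r c : Int) : String :=
  (PySem.List.pyGet? (pvRow board r) c).getD ""

-- the 'Q' entry of A's directions dict (superset of every entry)
def pvDirs8 : List (Int × Int) :=
  [(-1,-1),(-1,1),(1,-1),(1,1),(0,-1),(0,1),(-1,0),(1,0)]

-- A's while loop for one direction d (membership in the dict's directions
-- justifies termination: each step moves strictly in a fixed direction)
def slideA (board : List (List String)) (king : Int × Int) (d : Int × Int)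
    (hd : d ∈ pvDirs8) (r c : Int) : Bool :=
  if pvInB board r c then
    let r' := r + d.1
    let c' := c + d.2
    if (r', c') = king then true
    else if pvInB board r' c' && (pvCell board r' c' != ".") then false
    else slideA board king d hd r' c'
  else false
termination_by
  if d.1 = 1 then (board.length - r).toNat
  else if d.1 = -1 then (r + 1).toNat
  else if d.2 = 1 then ((pvRow board r).length - c).toNat
  else (c + 1).toNat
decreasing_by
  rename_i hin _ _
  simp only [pvDirs8, List.mem_cons] at hd
  simp only [pvInB, Bool.and_eq_true, decide_eq_true_eq] at hin
  rcases hd with h|h|h|h|h|h|h|h|h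
  all_goals first
    | (subst h; norm_num; omega)
    | simp at h

-- the for-loop over one piece's direction list (pawn is handled separately,
-- its branch never reaches the while loop)
def pvAnyDir (board : List (List String)) (king pos : Int × Int)
    (dirs : List (Int × Int)) (hsub : ∀ x ∈ dirs, x ∈ pvDirs8) : Bool :=
  dirs.attach.any fun x => slideA board king x.1 (hsub x.1 x.2) pos.1 pos.2

def Attack_Sword (piece : String) (position : Int × Int) (king_pos : Int × Int) (board : List (List String)) : Bool :=
  if piece = "P" then
    ([(-1,-1),(-1,1)] : List (Int × Int)).any fun d =>
      decide ((position.1 + d.1, position.2 + d.2) = king_pos)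
  else if piece = "B" then
    pvAnyDir board king_pos position [(-1,-1),(-1,1),(1,-1),(1,1)] (by decide)
  else if piece = "R" then
    pvAnyDir board king_pos position [(0,-1),(0,1),(-1,0),(1,0)] (by decide)
  else if piece = "Q" then
    pvAnyDir board king_pos position pvDirs8 (by decide)
  else false

-- ===== PORT B =====
def pvSign (x : Int) : Int := if x > 0 then 1 else if x < 0 then -1 else 0

-- Source B's for-loop over the k-1 intervening squares
def walkB (board : List (List String)) (sr sc : Int) : Nat → Int → Int → Bool
  | 0, _, _ => true
  | n+1, r, c =>
    if pvInB board r c && (pvCell board r c == ".") then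
      walkB board sr sc n (r + sr) (c + sc)
    else false

def Attack_Sword_alt (piece : String) (position : Int × Int) (king_pos : Int × Int) (board : List (List String)) : Bool :=
  let dr := king_pos.1 - position.1
  let dc := king_pos.2 - position.2
  if piece = "P" then decide (dr = -1 ∧ (dc = -1 ∨ dc = 1))
  else if piece = "B" ∨ piece = "R" ∨ piece = "Q" then
    let straight : Prop := (dr = 0) ≠ (dc = 0)
    let diagonal : Prop := dr ≠ 0 ∧ dr.natAbs = dc.natAbs
    if (piece = "R" ∧ ¬ straight) ∨ (piece = "B" ∧ ¬ diagonal)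
        ∨ (piece = "Q" ∧ ¬ (straight ∨ diagonal)) then false
    else
      let k := max dr.natAbs dc.natAbs
      let sr := pvSign dr
      let sc := pvSign dc
      if pvInB board position.1 position.2 then
        walkB board sr sc (k - 1) (position.1 + sr) (position.2 + sc)
      else false
  else false

-- ===== PRECONDITION & SPEC =====
def Spec_Attack_Sword (piece : String) (position : Int × Int) (king_pos : Int × Int) (board : List (List String)) (out : Bool) : Prop := out = Attack_Sword_alt piece position king_pos board
instance (piece : String) (position : Int × Int) (king_pos : Int × Int) (board : List (List String)) (out : Bool) : Decidable (Spec_Attack_Sword piece position king_pos board out) := by unfold Spec_Attack_Sword; infer_instance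

-- ===== CLAIM (what is proved, stated in full; the proofs are below) =====
def Claim_equal_Attack_Sword : Prop := ∀ (piece : String) (position : Int × Int) (king_pos : Int × Int) (board : List (List String)), Dom_Attack_Sword piece position king_pos board → Spec_Attack_Sword piece position king_pos board (Attack_Sword piece position king_pos board)

-- ===== LEMMAS AND PROOFS =====

-- the only direction distance that maps a square one step away is 1
theorem dir_k_one (d : Int × Int) (hd : d ∈ pvDirs8) (k : Nat)
    (h1 : (k : Int) * d.1 = d.1) (h2 : (k : Int) * d.2 = d.2) : k = 1 := by
  simp only [pvDirs8, List.mem_cons, List.not_mem_nil, or_false] at hd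
  rcases hd with h|h|h|h|h|h|h|h <;> subst h <;> simp_all <;> omega

-- if the king does not lie on the ray from (r,c) in direction d, the slide
-- loop returns false
theorem slideA_misaligned (board : List (List String)) (king : Int × Int)
    (d : Int × Int) (hd : d ∈ pvDirs8) (r c : Int)
    (h : ¬ ∃ k : Nat, 1 ≤ k ∧ king.1 = r + k * d.1 ∧ king.2 = c + k * d.2) :
    slideA board king d hd r c = false := by
  fun_induction slideA board king d hd r c with
  | case1 r c hin r' c' hk => -- king hit: distance 1 witnesses the ray
    exact absurd ⟨1, le_refl 1, by push_cast; simp [Prod.ext_iff] at hk; omega⟩ h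
  | case2 => rfl
  | case3 r c hin r' c' hk hb ih =>
    apply ih
    rintro ⟨k, hk1, e1, e2⟩
    exact h ⟨k + 1, by omega, by push_cast at e1 e2 ⊢; constructor <;> ring_nf <;> omega⟩
  | case4 => rfl

-- if the king lies on the ray at distance k ≥ 1, the slide loop computes
-- exactly B's bounds-then-clear-path check
theorem slideA_aligned (board : List (List String)) (king : Int × Int)
    (d : Int × Int) (hd : d ∈ pvDirs8) (k : Nat) (hk : 1 ≤ k) :
    ∀ r c : Int, king.1 = r + k * d.1 → king.2 = c + k * d.2 →
    slideA board king d hd r c =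
      (pvInB board r c && walkB board d.1 d.2 (k - 1) (r + d.1) (c + d.2)) := by
  induction k with
  | zero => omega
  | succ n ih =>
    intro r c h1 h2
    rw [slideA]
    by_cases hin : pvInB board r c = true
    · simp only [hin, if_pos, Bool.true_and]
      by_cases hking : ((r + d.1, c + d.2) : Int × Int) = king
      · -- the step lands on the king: the ray distance must be 1
        have hone : n + 1 = 1 := by
          apply dir_k_one d hd
          · have := hking ▸ h1; push_cast at this ⊢
            linear_combination -this
          · have := hking ▸ h2; push_cast at this ⊢
            linear_combination -this
        have hn0 : n = 0 := by omega
        subst hn0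
        simp [hking, walkB]
      · -- not the king, so the distance is at least 2
        have hn1 : 1 ≤ n := by
          rcases Nat.lt_or_ge n 1 with h | h
          · exfalso; interval_cases n
            exact hking (by simp only [Prod.ext_iff]; push_cast at h1 h2; omega)
          · exact h
        have hstep : walkB board d.1 d.2 (n + 1 - 1) (r + d.1) (c + d.2)
            = if pvInB board (r + d.1) (c + d.2) && (pvCell board (r + d.1) (c + d.2) == ".") then
                walkB board d.1 d.2 (n - 1) (r + d.1 + d.1) (c + d.2 + d.2) else false := by
          obtain ⟨m, rfl⟩ : ∃ m, n = m + 1 := ⟨n - 1, by omega⟩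
          simp [walkB]
        rw [if_neg hking, hstep]
        by_cases hblock : (pvInB board (r + d.1) (c + d.2) && (pvCell board (r + d.1) (c + d.2) != ".")) = true
        · -- blocker: A breaks, B's path check fails at the same square
          rw [if_pos hblock]
          rw [Bool.and_eq_true] at hblock
          simp [hblock.1, bne_iff_ne.mp hblock.2]
        · rw [if_neg hblock]
          have ihr := ih hn1 (r + d.1) (c + d.2)
            (by push_cast at h1 ⊢; linear_combination h1)
            (by push_cast at h2 ⊢; linear_combination h2)
          rw [ihr]
          simp only [Bool.and_eq_true, bne_iff_ne, ne_eq, not_and, not_not] at hblock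
          by_cases hin' : pvInB board (r + d.1) (c + d.2) = true
          · simp [hin', hblock hin']
          · simp only [Bool.not_eq_true] at hin'; simp [hin']
    · simp only [Bool.not_eq_true] at hin; simp [hin]


theorem pvSign_pos {x : Int} (h : 0 < x) : pvSign x = 1 := by unfold pvSign; rw [if_pos h]
theorem pvSign_neg {x : Int} (h : x < 0) : pvSign x = -1 := by unfold pvSign; rw [if_neg (by omega), if_pos h]
theorem pvSign_zero {x : Int} (h : x = 0) : pvSign x = 0 := by unfold pvSign; rw [if_neg (by omega), if_neg (by omega)]
theorem band_eq_ite (b x : Bool) : (b && x) = if b = true then x else false := by cases b <;> simp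

-- ===== VERDICT (by name: the statement is the Claim_ definition above) =====
theorem Attack_Sword_spec : Claim_equal_Attack_Sword := by
  intro piece pos king board _
  obtain ⟨pr, pc⟩ := pos
  obtain ⟨kr, kc⟩ := king
  show Attack_Sword piece (pr,pc) (kr,kc) board = Attack_Sword_alt piece (pr,pc) (kr,kc) board
  by_cases hP : piece = "P"
  · subst hP
    simp only [Attack_Sword, Attack_Sword_alt, String.reduceEq, if_true, List.any_cons,
      List.any_nil, Bool.or_false]
    rw [Bool.eq_iff_iff]
    simp only [Bool.or_eq_true, decide_eq_true_eq, Prod.mk.injEq]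
    omega
  by_cases hB : piece = "B"
  · subst hB
    simp only [Attack_Sword, Attack_Sword_alt, String.reduceEq, if_false, if_true,
      pvAnyDir, List.attach, List.attachWith, List.pmap, List.any_cons, List.any_nil,
      false_and, false_or, or_false, true_and]
    by_cases hrz : kr - pr = 0
    · rw [if_pos (by simp [hrz])]
      rw [slideA_misaligned board (kr,kc) (-1,-1) _ pr pc (by rintro ⟨k,hk,e1,e2⟩; dsimp only at e1 e2; omega), slideA_misaligned board (kr,kc) (-1,1) _ pr pc (by rintro ⟨k,hk,e1,e2⟩; dsimp only at e1 e2; omega), slideA_misaligned board (kr,kc) (1,-1) _ pr pc (by rintro ⟨k,hk,e1,e2⟩; dsimp only at e1 e2; omega), slideA_misaligned board (kr,kc) (1,1) _ pr pc (by rintro ⟨k,hk,e1,e2⟩; dsimp only at e1 e2; omega)]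
      simp
    · by_cases habs : (kr - pr).natAbs = (kc - pc).natAbs
      · rw [if_neg (by simp [hrz, habs])]
        by_cases hr : 0 < kr - pr <;> by_cases hc : 0 < kc - pc
        ·
          rw [slideA_misaligned board (kr,kc) (-1,-1) _ pr pc (by rintro ⟨k,hk,e1,e2⟩; dsimp only at e1 e2; omega), slideA_misaligned board (kr,kc) (-1,1) _ pr pc (by rintro ⟨k,hk,e1,e2⟩; dsimp only at e1 e2; omega), slideA_misaligned board (kr,kc) (1,-1) _ pr pc (by rintro ⟨k,hk,e1,e2⟩; dsimp only at e1 e2; omega), slideA_aligned board (kr,kc) (1,1) _ ((kr - pr).natAbs) (by omega) pr pc (by dsimp only; omega) (by dsimp only; omega)]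
          simp only [Bool.false_or, Bool.or_false]
          have hmax : max (kr - pr).natAbs (kc - pc).natAbs = ((kr - pr).natAbs) := by omega
          rw [pvSign_pos (by omega), pvSign_pos (by omega), hmax, band_eq_ite]
        ·
          rw [slideA_misaligned board (kr,kc) (-1,-1) _ pr pc (by rintro ⟨k,hk,e1,e2⟩; dsimp only at e1 e2; omega), slideA_misaligned board (kr,kc) (-1,1) _ pr pc (by rintro ⟨k,hk,e1,e2⟩; dsimp only at e1 e2; omega), slideA_aligned board (kr,kc) (1,-1) _ ((kr - pr).natAbs) (by omega) pr pc (by dsimp only; omega) (by dsimp only; omega), slideA_misaligned board (kr,kc) (1,1) _ pr pc (by rintro ⟨k,hk,e1,e2⟩; dsimp only at e1 e2; omega)]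
          simp only [Bool.false_or, Bool.or_false]
          have hmax : max (kr - pr).natAbs (kc - pc).natAbs = ((kr - pr).natAbs) := by omega
          rw [pvSign_pos (by omega), pvSign_neg (by omega), hmax, band_eq_ite]
        ·
          rw [slideA_misaligned board (kr,kc) (-1,-1) _ pr pc (by rintro ⟨k,hk,e1,e2⟩; dsimp only at e1 e2; omega), slideA_aligned board (kr,kc) (-1,1) _ ((kr - pr).natAbs) (by omega) pr pc (by dsimp only; omega) (by dsimp only; omega), slideA_misaligned board (kr,kc) (1,-1) _ pr pc (by rintro ⟨k,hk,e1,e2⟩; dsimp only at e1 e2; omega), slideA_misaligned board (kr,kc) (1,1) _ pr pc (by rintro ⟨k,hk,e1,e2⟩; dsimp only at e1 e2; omega)]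
          simp only [Bool.false_or, Bool.or_false]
          have hmax : max (kr - pr).natAbs (kc - pc).natAbs = ((kr - pr).natAbs) := by omega
          rw [pvSign_neg (by omega), pvSign_pos (by omega), hmax, band_eq_ite]
        ·
          rw [slideA_aligned board (kr,kc) (-1,-1) _ ((kr - pr).natAbs) (by omega) pr pc (by dsimp only; omega) (by dsimp only; omega), slideA_misaligned board (kr,kc) (-1,1) _ pr pc (by rintro ⟨k,hk,e1,e2⟩; dsimp only at e1 e2; omega), slideA_misaligned board (kr,kc) (1,-1) _ pr pc (by rintro ⟨k,hk,e1,e2⟩; dsimp only at e1 e2; omega), slideA_misaligned board (kr,kc) (1,1) _ pr pc (by rintro ⟨k,hk,e1,e2⟩; dsimp only at e1 e2; omega)]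
          simp only [Bool.or_false]
          have hmax : max (kr - pr).natAbs (kc - pc).natAbs = ((kr - pr).natAbs) := by omega
          rw [pvSign_neg (by omega), pvSign_neg (by omega), hmax, band_eq_ite]
      · rw [if_pos (by simp [habs])]
        rw [slideA_misaligned board (kr,kc) (-1,-1) _ pr pc (by rintro ⟨k,hk,e1,e2⟩; dsimp only at e1 e2; omega), slideA_misaligned board (kr,kc) (-1,1) _ pr pc (by rintro ⟨k,hk,e1,e2⟩; dsimp only at e1 e2; omega), slideA_misaligned board (kr,kc) (1,-1) _ pr pc (by rintro ⟨k,hk,e1,e2⟩; dsimp only at e1 e2; omega), slideA_misaligned board (kr,kc) (1,1) _ pr pc (by rintro ⟨k,hk,e1,e2⟩; dsimp only at e1 e2; omega)]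
        simp
  by_cases hR : piece = "R"
  · subst hR
    simp only [Attack_Sword, Attack_Sword_alt, String.reduceEq, if_false, if_true,
      pvAnyDir, List.attach, List.attachWith, List.pmap, List.any_cons, List.any_nil,
      false_and, false_or, or_false, true_and]
    by_cases hrz : kr - pr = 0 <;> by_cases hcz : kc - pc = 0
    · rw [if_pos (by simp [hrz, hcz])]
      rw [slideA_misaligned board (kr,kc) (0,-1) _ pr pc (by rintro ⟨k,hk,e1,e2⟩; dsimp only at e1 e2; omega), slideA_misaligned board (kr,kc) (0,1) _ pr pc (by rintro ⟨k,hk,e1,e2⟩; dsimp only at e1 e2; omega), slideA_misaligned board (kr,kc) (-1,0) _ pr pc (by rintro ⟨k,hk,e1,e2⟩; dsimp only at e1 e2; omega), slideA_misaligned board (kr,kc) (1,0) _ pr pc (by rintro ⟨k,hk,e1,e2⟩; dsimp only at e1 e2; omega)]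
      simp
    · rw [if_neg (by simp [hrz, hcz])]
      by_cases hc : 0 < kc - pc
      ·
        rw [slideA_misaligned board (kr,kc) (0,-1) _ pr pc (by rintro ⟨k,hk,e1,e2⟩; dsimp only at e1 e2; omega), slideA_aligned board (kr,kc) (0,1) _ ((kc - pc).natAbs) (by omega) pr pc (by dsimp only; omega) (by dsimp only; omega), slideA_misaligned board (kr,kc) (-1,0) _ pr pc (by rintro ⟨k,hk,e1,e2⟩; dsimp only at e1 e2; omega), slideA_misaligned board (kr,kc) (1,0) _ pr pc (by rintro ⟨k,hk,e1,e2⟩; dsimp only at e1 e2; omega)]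
        simp only [Bool.false_or, Bool.or_false]
        have hmax : max (kr - pr).natAbs (kc - pc).natAbs = ((kc - pc).natAbs) := by omega
        rw [pvSign_zero (by omega), pvSign_pos (by omega), hmax, band_eq_ite]
      ·
        rw [slideA_aligned board (kr,kc) (0,-1) _ ((kc - pc).natAbs) (by omega) pr pc (by dsimp only; omega) (by dsimp only; omega), slideA_misaligned board (kr,kc) (0,1) _ pr pc (by rintro ⟨k,hk,e1,e2⟩; dsimp only at e1 e2; omega), slideA_misaligned board (kr,kc) (-1,0) _ pr pc (by rintro ⟨k,hk,e1,e2⟩; dsimp only at e1 e2; omega), slideA_misaligned board (kr,kc) (1,0) _ pr pc (by rintro ⟨k,hk,e1,e2⟩; dsimp only at e1 e2; omega)]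
        simp only [Bool.or_false]
        have hmax : max (kr - pr).natAbs (kc - pc).natAbs = ((kc - pc).natAbs) := by omega
        rw [pvSign_zero (by omega), pvSign_neg (by omega), hmax, band_eq_ite]
    · rw [if_neg (by simp [hrz, hcz])]
      by_cases hr : 0 < kr - pr
      ·
        rw [slideA_misaligned board (kr,kc) (0,-1) _ pr pc (by rintro ⟨k,hk,e1,e2⟩; dsimp only at e1 e2; omega), slideA_misaligned board (kr,kc) (0,1) _ pr pc (by rintro ⟨k,hk,e1,e2⟩; dsimp only at e1 e2; omega), slideA_misaligned board (kr,kc) (-1,0) _ pr pc (by rintro ⟨k,hk,e1,e2⟩; dsimp only at e1 e2; omega), slideA_aligned board (kr,kc) (1,0) _ ((kr - pr).natAbs) (by omega) pr pc (by dsimp only; omega) (by dsimp only; omega)]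
        simp only [Bool.false_or, Bool.or_false]
        have hmax : max (kr - pr).natAbs (kc - pc).natAbs = ((kr - pr).natAbs) := by omega
        rw [pvSign_pos (by omega), pvSign_zero (by omega), hmax, band_eq_ite]
      ·
        rw [slideA_misaligned board (kr,kc) (0,-1) _ pr pc (by rintro ⟨k,hk,e1,e2⟩; dsimp only at e1 e2; omega), slideA_misaligned board (kr,kc) (0,1) _ pr pc (by rintro ⟨k,hk,e1,e2⟩; dsimp only at e1 e2; omega), slideA_aligned board (kr,kc) (-1,0) _ ((kr - pr).natAbs) (by omega) pr pc (by dsimp only; omega) (by dsimp only; omega), slideA_misaligned board (kr,kc) (1,0) _ pr pc (by rintro ⟨k,hk,e1,e2⟩; dsimp only at e1 e2; omega)]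
        simp only [Bool.false_or, Bool.or_false]
        have hmax : max (kr - pr).natAbs (kc - pc).natAbs = ((kr - pr).natAbs) := by omega
        rw [pvSign_neg (by omega), pvSign_zero (by omega), hmax, band_eq_ite]
    · rw [if_pos (by simp [hrz, hcz])]
      rw [slideA_misaligned board (kr,kc) (0,-1) _ pr pc (by rintro ⟨k,hk,e1,e2⟩; dsimp only at e1 e2; omega), slideA_misaligned board (kr,kc) (0,1) _ pr pc (by rintro ⟨k,hk,e1,e2⟩; dsimp only at e1 e2; omega), slideA_misaligned board (kr,kc) (-1,0) _ pr pc (by rintro ⟨k,hk,e1,e2⟩; dsimp only at e1 e2; omega), slideA_misaligned board (kr,kc) (1,0) _ pr pc (by rintro ⟨k,hk,e1,e2⟩; dsimp only at e1 e2; omega)]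
      simp
  by_cases hQ : piece = "Q"
  · subst hQ
    simp only [Attack_Sword, Attack_Sword_alt, String.reduceEq, if_false, if_true, pvDirs8,
      pvAnyDir, List.attach, List.attachWith, List.pmap, List.any_cons, List.any_nil,
      false_and, false_or, true_and]
    by_cases hrz : kr - pr = 0 <;> by_cases hcz : kc - pc = 0
    · rw [if_pos (by simp [hrz, hcz])]
      rw [slideA_misaligned board (kr,kc) (-1,-1) _ pr pc (by rintro ⟨k,hk,e1,e2⟩; dsimp only at e1 e2; omega), slideA_misaligned board (kr,kc) (-1,1) _ pr pc (by rintro ⟨k,hk,e1,e2⟩; dsimp only at e1 e2; omega), slideA_misaligned board (kr,kc) (1,-1) _ pr pc (by rintro ⟨k,hk,e1,e2⟩; dsimp only at e1 e2; omega), slideA_misaligned board (kr,kc) (1,1) _ pr pc (by rintro ⟨k,hk,e1,e2⟩; dsimp only at e1 e2; omega), slideA_misaligned board (kr,kc) (0,-1) _ pr pc (by rintro ⟨k,hk,e1,e2⟩; dsimp only at e1 e2; omega), slideA_misaligned board (kr,kc) (0,1) _ pr pc (by rintro ⟨k,hk,e1,e2⟩; dsimp only at e1 e2; omega), slideA_misaligned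 board (kr,kc) (-1,0) _ pr pc (by rintro ⟨k,hk,e1,e2⟩; dsimp only at e1 e2; omega), slideA_misaligned board (kr,kc) (1,0) _ pr pc (by rintro ⟨k,hk,e1,e2⟩; dsimp only at e1 e2; omega)]
      simp
    · rw [if_neg (by simp [hrz, hcz])]
      by_cases hc : 0 < kc - pc
      ·
        rw [slideA_misaligned board (kr,kc) (-1,-1) _ pr pc (by rintro ⟨k,hk,e1,e2⟩; dsimp only at e1 e2; omega), slideA_misaligned board (kr,kc) (-1,1) _ pr pc (by rintro ⟨k,hk,e1,e2⟩; dsimp only at e1 e2; omega), slideA_misaligned board (kr,kc) (1,-1) _ pr pc (by rintro ⟨k,hk,e1,e2⟩; dsimp only at e1 e2; omega), slideA_misaligned board (kr,kc) (1,1) _ pr pc (by rintro ⟨k,hk,e1,e2⟩; dsimp only at e1 e2; omega), slideA_misaligned board (kr,kc) (0,-1) _ pr pc (by rintro ⟨k,hk,e1,e2⟩; dsimp only at e1 e2; omega), slideA_aligned board (kr,kc) (0,1) _ ((kc - pc).natAbs) (by omega) pr pc (by dsimp only; omega) (by dsimp only; omega), slideA_misaligned board (kr,kc) (-1,0) _ pr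 pc (by rintro ⟨k,hk,e1,e2⟩; dsimp only at e1 e2; omega), slideA_misaligned board (kr,kc) (1,0) _ pr pc (by rintro ⟨k,hk,e1,e2⟩; dsimp only at e1 e2; omega)]
        simp only [Bool.false_or, Bool.or_false]
        have hmax : max (kr - pr).natAbs (kc - pc).natAbs = ((kc - pc).natAbs) := by omega
        rw [pvSign_zero (by omega), pvSign_pos (by omega), hmax, band_eq_ite]
      ·
        rw [slideA_misaligned board (kr,kc) (-1,-1) _ pr pc (by rintro ⟨k,hk,e1,e2⟩; dsimp only at e1 e2; omega), slideA_misaligned board (kr,kc) (-1,1) _ pr pc (by rintro ⟨k,hk,e1,e2⟩; dsimp only at e1 e2; omega), slideA_misaligned board (kr,kc) (1,-1) _ pr pc (by rintro ⟨k,hk,e1,e2⟩; dsimp only at e1 e2; omega), slideA_misaligned board (kr,kc) (1,1) _ pr pc (by rintro ⟨k,hk,e1,e2⟩; dsimp only at e1 e2; omega), slideA_aligned board (kr,kc) (0,-1) _ ((kc - pc).natAbs) (by omega) pr pc (by dsimp only; omega) (by dsimp only; omega), slideA_misaligned board (kr,kc) (0,1) _ pr pc (by rintro ⟨k,hk,e1,e2⟩;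 dsimp only at e1 e2; omega), slideA_misaligned board (kr,kc) (-1,0) _ pr pc (by rintro ⟨k,hk,e1,e2⟩; dsimp only at e1 e2; omega), slideA_misaligned board (kr,kc) (1,0) _ pr pc (by rintro ⟨k,hk,e1,e2⟩; dsimp only at e1 e2; omega)]
        simp only [Bool.false_or, Bool.or_false]
        have hmax : max (kr - pr).natAbs (kc - pc).natAbs = ((kc - pc).natAbs) := by omega
        rw [pvSign_zero (by omega), pvSign_neg (by omega), hmax, band_eq_ite]
    · rw [if_neg (by simp [hrz, hcz])]
      by_cases hr : 0 < kr - pr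
      ·
        rw [slideA_misaligned board (kr,kc) (-1,-1) _ pr pc (by rintro ⟨k,hk,e1,e2⟩; dsimp only at e1 e2; omega), slideA_misaligned board (kr,kc) (-1,1) _ pr pc (by rintro ⟨k,hk,e1,e2⟩; dsimp only at e1 e2; omega), slideA_misaligned board (kr,kc) (1,-1) _ pr pc (by rintro ⟨k,hk,e1,e2⟩; dsimp only at e1 e2; omega), slideA_misaligned board (kr,kc) (1,1) _ pr pc (by rintro ⟨k,hk,e1,e2⟩; dsimp only at e1 e2; omega), slideA_misaligned board (kr,kc) (0,-1) _ pr pc (by rintro ⟨k,hk,e1,e2⟩; dsimp only at e1 e2; omega), slideA_misaligned board (kr,kc) (0,1) _ pr pc (by rintro ⟨k,hk,e1,e2⟩; dsimp only at e1 e2; omega), slideA_misaligned board (kr,kc) (-1,0) _ pr pc (by rintro ⟨k,hk,e1,e2⟩; dsimp only at e1 e2; omega), slideA_aligned board (kr,kc) (1,0) _ ((kr - pr).natAbs) (by omega) pr pc (by dsimp only; omega) (by dsimp only; omega)]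
        simp only [Bool.false_or, Bool.or_false]
        have hmax : max (kr - pr).natAbs (kc - pc).natAbs = ((kr - pr).natAbs) := by omega
        rw [pvSign_pos (by omega), pvSign_zero (by omega), hmax, band_eq_ite]
      ·
        rw [slideA_misaligned board (kr,kc) (-1,-1) _ pr pc (by rintro ⟨k,hk,e1,e2⟩; dsimp only at e1 e2; omega), slideA_misaligned board (kr,kc) (-1,1) _ pr pc (by rintro ⟨k,hk,e1,e2⟩; dsimp only at e1 e2; omega), slideA_misaligned board (kr,kc) (1,-1) _ pr pc (by rintro ⟨k,hk,e1,e2⟩; dsimp only at e1 e2; omega), slideA_misaligned board (kr,kc) (1,1) _ pr pc (by rintro ⟨k,hk,e1,e2⟩; dsimp only at e1 e2; omega), slideA_misaligned board (kr,kc) (0,-1) _ pr pc (by rintro ⟨k,hk,e1,e2⟩; dsimp only at e1 e2; omega), slideA_misaligned board (kr,kc) (0,1) _ pr pc (by rintro ⟨k,hk,e1,e2⟩; dsimp only at e1 e2; omega), slideA_aligned board (kr,kc) (-1,0) _ ((kr - pr).natAbs) (by omega) pr pc (by dsimp only; omega) (by dsimp only; omega), slideA_misaligned board (kr,kc) (1,0)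 _ pr pc (by rintro ⟨k,hk,e1,e2⟩; dsimp only at e1 e2; omega)]
        simp only [Bool.false_or, Bool.or_false]
        have hmax : max (kr - pr).natAbs (kc - pc).natAbs = ((kr - pr).natAbs) := by omega
        rw [pvSign_neg (by omega), pvSign_zero (by omega), hmax, band_eq_ite]
    · by_cases habs : (kr - pr).natAbs = (kc - pc).natAbs
      · rw [if_neg (by simp [hrz, hcz, habs])]
        by_cases hr : 0 < kr - pr <;> by_cases hc : 0 < kc - pc
        ·
          rw [slideA_misaligned board (kr,kc) (-1,-1) _ pr pc (by rintro ⟨k,hk,e1,e2⟩; dsimp only at e1 e2; omega), slideA_misaligned board (kr,kc) (-1,1) _ pr pc (by rintro ⟨k,hk,e1,e2⟩; dsimp only at e1 e2; omega), slideA_misaligned board (kr,kc) (1,-1) _ pr pc (by rintro ⟨k,hk,e1,e2⟩; dsimp only at e1 e2; omega), slideA_aligned board (kr,kc) (1,1) _ ((kr - pr).natAbs) (by omega) pr pc (by dsimp only; omega) (by dsimp only; omega), slideA_misaligned board (kr,kc) (0,-1) _ pr pc (by rintro ⟨k,hk,e1,e2⟩; dsimp only at e1 e2; omega), slideA_misaligned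 board (kr,kc) (0,1) _ pr pc (by rintro ⟨k,hk,e1,e2⟩; dsimp only at e1 e2; omega), slideA_misaligned board (kr,kc) (-1,0) _ pr pc (by rintro ⟨k,hk,e1,e2⟩; dsimp only at e1 e2; omega), slideA_misaligned board (kr,kc) (1,0) _ pr pc (by rintro ⟨k,hk,e1,e2⟩; dsimp only at e1 e2; omega)]
          simp only [Bool.false_or, Bool.or_false]
          have hmax : max (kr - pr).natAbs (kc - pc).natAbs = ((kr - pr).natAbs) := by omega
          rw [pvSign_pos (by omega), pvSign_pos (by omega), hmax, band_eq_ite]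
        ·
          rw [slideA_misaligned board (kr,kc) (-1,-1) _ pr pc (by rintro ⟨k,hk,e1,e2⟩; dsimp only at e1 e2; omega), slideA_misaligned board (kr,kc) (-1,1) _ pr pc (by rintro ⟨k,hk,e1,e2⟩; dsimp only at e1 e2; omega), slideA_aligned board (kr,kc) (1,-1) _ ((kr - pr).natAbs) (by omega) pr pc (by dsimp only; omega) (by dsimp only; omega), slideA_misaligned board (kr,kc) (1,1) _ pr pc (by rintro ⟨k,hk,e1,e2⟩; dsimp only at e1 e2; omega), slideA_misaligned board (kr,kc) (0,-1) _ pr pc (by rintro ⟨k,hk,e1,e2⟩; dsimp only at e1 e2; omega), slideA_misaligned board (kr,kc) (0,1) _ pr pc (by rintro ⟨k,hk,e1,e2⟩; dsimp only at e1 e2; omega), slideA_misaligned board (kr,kc) (-1,0) _ pr pc (by rintro ⟨k,hk,e1,e2⟩; dsimp only at e1 e2; omega), slideA_misaligned board (kr,kc) (1,0) _ pr pc (by rintro ⟨k,hk,e1,e2⟩; dsimp only at e1 e2; omega)]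
          simp only [Bool.false_or, Bool.or_false]
          have hmax : max (kr - pr).natAbs (kc - pc).natAbs = ((kr - pr).natAbs) := by omega
          rw [pvSign_pos (by omega), pvSign_neg (by omega), hmax, band_eq_ite]
        ·
          rw [slideA_misaligned board (kr,kc) (-1,-1) _ pr pc (by rintro ⟨k,hk,e1,e2⟩; dsimp only at e1 e2; omega), slideA_aligned board (kr,kc) (-1,1) _ ((kr - pr).natAbs) (by omega) pr pc (by dsimp only; omega) (by dsimp only; omega), slideA_misaligned board (kr,kc) (1,-1) _ pr pc (by rintro ⟨k,hk,e1,e2⟩; dsimp only at e1 e2; omega), slideA_misaligned board (kr,kc) (1,1) _ pr pc (by rintro ⟨k,hk,e1,e2⟩; dsimp only at e1 e2; omega), slideA_misaligned board (kr,kc) (0,-1) _ pr pc (by rintro ⟨k,hk,e1,e2⟩; dsimp only at e1 e2; omega), slideA_misaligned board (kr,kc) (0,1) _ pr pc (by rintro ⟨k,hk,e1,e2⟩; dsimp only at e1 e2; omega), slideA_misaligned board (kr,kc) (-1,0) _ pr pc (by rintro ⟨k,hk,e1,e2⟩; dsimp only at e1 e2; omega), slideA_misaligned board (kr,kc) (1,0)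 _ pr pc (by rintro ⟨k,hk,e1,e2⟩; dsimp only at e1 e2; omega)]
          simp only [Bool.false_or, Bool.or_false]
          have hmax : max (kr - pr).natAbs (kc - pc).natAbs = ((kr - pr).natAbs) := by omega
          rw [pvSign_neg (by omega), pvSign_pos (by omega), hmax, band_eq_ite]
        ·
          rw [slideA_aligned board (kr,kc) (-1,-1) _ ((kr - pr).natAbs) (by omega) pr pc (by dsimp only; omega) (by dsimp only; omega), slideA_misaligned board (kr,kc) (-1,1) _ pr pc (by rintro ⟨k,hk,e1,e2⟩; dsimp only at e1 e2; omega), slideA_misaligned board (kr,kc) (1,-1) _ pr pc (by rintro ⟨k,hk,e1,e2⟩; dsimp only at e1 e2; omega), slideA_misaligned board (kr,kc) (1,1) _ pr pc (by rintro ⟨k,hk,e1,e2⟩; dsimp only at e1 e2; omega), slideA_misaligned board (kr,kc) (0,-1) _ pr pc (by rintro ⟨k,hk,e1,e2⟩; dsimp only at e1 e2; omega), slideA_misaligned board (kr,kc) (0,1) _ pr pc (by rintro ⟨k,hk,e1,e2⟩; dsimp only at e1 e2; omega), slideA_misaligned board (kr,kc) (-1,0) _ pr pc (by rintro ⟨k,hk,e1,e2⟩;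 dsimp only at e1 e2; omega), slideA_misaligned board (kr,kc) (1,0) _ pr pc (by rintro ⟨k,hk,e1,e2⟩; dsimp only at e1 e2; omega)]
          simp only [Bool.or_false]
          have hmax : max (kr - pr).natAbs (kc - pc).natAbs = ((kr - pr).natAbs) := by omega
          rw [pvSign_neg (by omega), pvSign_neg (by omega), hmax, band_eq_ite]
      · rw [if_pos (by simp [hrz, hcz, habs])]
        rw [slideA_misaligned board (kr,kc) (-1,-1) _ pr pc (by rintro ⟨k,hk,e1,e2⟩; dsimp only at e1 e2; omega), slideA_misaligned board (kr,kc) (-1,1) _ pr pc (by rintro ⟨k,hk,e1,e2⟩; dsimp only at e1 e2; omega), slideA_misaligned board (kr,kc) (1,-1) _ pr pc (by rintro ⟨k,hk,e1,e2⟩; dsimp only at e1 e2; omega), slideA_misaligned board (kr,kc) (1,1) _ pr pc (by rintro ⟨k,hk,e1,e2⟩; dsimp only at e1 e2; omega), slideA_misaligned board (kr,kc) (0,-1) _ pr pc (by rintro ⟨k,hk,e1,e2⟩; dsimp only at e1 e2; omega), slideA_misaligned board (kr,kc) (0,1) _ pr pc (by rintro ⟨k,hk,e1,e2⟩; dsimp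 only at e1 e2; omega), slideA_misaligned board (kr,kc) (-1,0) _ pr pc (by rintro ⟨k,hk,e1,e2⟩; dsimp only at e1 e2; omega), slideA_misaligned board (kr,kc) (1,0) _ pr pc (by rintro ⟨k,hk,e1,e2⟩; dsimp only at e1 e2; omega)]
        simp
  · rw [Attack_Sword, if_neg hP, if_neg hB, if_neg hR, if_neg hQ,
      Attack_Sword_alt, if_neg hP, if_neg (by rintro (h|h|h) <;> contradiction)]
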